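-- pv_equiv track=rewrite | github.com/somesh-ghaturle/Projects | Multi-Agent-Content-Analytics/simple_app.py | _find_similar_content
-- ===== SOURCE A (Python) =====
-- from typing import Dict, Any, List, Optional
--
-- def _find_similar_content(content: str) -> List[str]:
--     content_lower = content.lower()
--
--     similar_content = []
--
--     if any(word in content_lower for word in ["space", "alien", "mars"]):
--         similar_content.extend(["Interstellar", "The Martian", "Arrival"])
--
--     if any(word in content_lower for word in ["love", "romance", "heart"]):
--         similar_content.extend(["The Notebook", "Titanic", "La La Land"])
--
--     if any(word in content_lower for word in ["action", "fight", "chase"]):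
--         similar_content.extend(["John Wick", "Mission Impossible", "Fast & Furious"])
--
--     if not similar_content:
--         similar_content = ["Popular drama films", "Character-driven stories", "Independent cinema"]
--
--     return similar_content[:3]
-- ===== SOURCE B (Python) =====
-- from typing import List
--
-- _RULES = [
--     (["space", "alien", "mars"], ["Interstellar", "The Martian", "Arrival"]),
--     (["love", "romance", "heart"], ["The Notebook", "Titanic", "La La Land"]),
--     (["action", "fight", "chase"], ["John Wick", "Mission Impossible", "Fast & Furious"]),
-- ]
--
-- def _find_similar_content(content: str) -> List[str]:
--     content_lower = content.lower()
--     for keywords, titles in _RULES: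
--         if any(word in content_lower for word in keywords):
--             return titles[:3]
--     return ["Popular drama films", "Character-driven stories", "Independent cinema"]
-- ===== Notes on version B (the rewrite author's own statement) =====
-- stated objective: simpler
-- what changed: Replaced the accumulate-three-if-blocks-then-truncate structure by a data-driven rule table scanned with an early return of the first matching rule's titles (each rule has exactly 3 titles, so truncation makes only the first match matter).
import Mathlib
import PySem

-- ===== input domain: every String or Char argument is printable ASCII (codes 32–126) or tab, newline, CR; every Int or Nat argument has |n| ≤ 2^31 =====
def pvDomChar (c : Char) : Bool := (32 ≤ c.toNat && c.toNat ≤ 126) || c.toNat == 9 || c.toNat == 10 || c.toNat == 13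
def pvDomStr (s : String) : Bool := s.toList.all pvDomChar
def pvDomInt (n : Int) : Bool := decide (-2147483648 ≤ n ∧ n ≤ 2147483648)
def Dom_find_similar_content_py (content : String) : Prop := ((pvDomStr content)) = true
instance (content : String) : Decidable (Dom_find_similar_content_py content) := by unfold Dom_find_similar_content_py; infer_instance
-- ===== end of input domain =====

-- B replaces A's accumulate-then-truncate if-chain by a rule table scanned for the first match (simpler decomposition).


-- ===== PORT A =====
def find_similar_content_py (content : String) : List String :=
  let content_lower := PySem.Str.lower content
  let similar_content : List String := []
  let similar_content :=
    if (["space", "alien", "mars"].any (fun word => PySem.Str.isIn word content_lower)) then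
      similar_content ++ ["Interstellar", "The Martian", "Arrival"]
    else similar_content
  let similar_content :=
    if (["love", "romance", "heart"].any (fun word => PySem.Str.isIn word content_lower)) then
      similar_content ++ ["The Notebook", "Titanic", "La La Land"]
    else similar_content
  let similar_content :=
    if (["action", "fight", "chase"].any (fun word => PySem.Str.isIn word content_lower)) then
      similar_content ++ ["John Wick", "Mission Impossible", "Fast & Furious"]
    else similar_content
  let similar_content :=
    if similar_content = [] then
      ["Popular drama films", "Character-driven stories", "Independent cinema"]
    else similar_content
  PySem.List.slice similar_content none (some 3)

-- ===== PORT B =====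
def pvRules : List (List String × List String) :=
  [ (["space", "alien", "mars"], ["Interstellar", "The Martian", "Arrival"]),
    (["love", "romance", "heart"], ["The Notebook", "Titanic", "La La Land"]),
    (["action", "fight", "chase"], ["John Wick", "Mission Impossible", "Fast & Furious"]) ]

def pvFirstMatch (content_lower : String) : List (List String × List String) → List String
  | [] => ["Popular drama films", "Character-driven stories", "Independent cinema"]
  | (keywords, titles) :: rest =>
      if keywords.any (fun word => PySem.Str.isIn word content_lower) then
        PySem.List.slice titles none (some 3)
      else pvFirstMatch content_lower rest

def find_similar_content_py_alt (content : String) : List String :=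
  pvFirstMatch (PySem.Str.lower content) pvRules

-- ===== PRECONDITION & SPEC =====
def Spec_find_similar_content_py (content : String) (out : List String) : Prop := out = find_similar_content_py_alt content
instance (content : String) (out : List String) : Decidable (Spec_find_similar_content_py content out) := by unfold Spec_find_similar_content_py; infer_instance

-- ===== CLAIM (what is proved, stated in full; the proofs are below) =====
def Claim_equal_find_similar_content_py : Prop := ∀ (content : String), Dom_find_similar_content_py content → Spec_find_similar_content_py content (find_similar_content_py content)

-- ===== LEMMAS AND PROOFS =====

-- ===== VERDICT (by name: the statement is the Claim_ definition above) =====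
theorem find_similar_content_py_spec : Claim_equal_find_similar_content_py := by
  intro content _
  unfold Spec_find_similar_content_py
  simp only [find_similar_content_py, find_similar_content_py_alt, pvRules, pvFirstMatch]
  generalize (["space", "alien", "mars"].any (fun word => PySem.Str.isIn word (PySem.Str.lower content))) = b1
  generalize (["love", "romance", "heart"].any (fun word => PySem.Str.isIn word (PySem.Str.lower content))) = b2
  generalize (["action", "fight", "chase"].any (fun word => PySem.Str.isIn word (PySem.Str.lower content))) = b3
  cases b1 <;> cases b2 <;> cases b3 <;> rfl
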